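-- pv_equiv track=rewrite | github.com/MashiroSaber03/Saber-Translator | src/core/manga_insight/task_executor.py | _build_chapter_page_map
-- ===== SOURCE A (Python) =====
-- from typing import Dict, List, Callable
--
-- def _build_chapter_page_map(all_images: List[Dict]) -> Dict[str, List[int]]:
--     """构建章节到页码的映射"""
--     chapter_page_map = {}
--     for idx, img in enumerate(all_images):
--         ch_id = img.get("chapter_id")
--         if ch_id:
--             if ch_id not in chapter_page_map:
--                 chapter_page_map[ch_id] = []
--             chapter_page_map[ch_id].append(idx + 1)
--     return chapter_page_map
-- ===== SOURCE B (Python) =====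
-- def _build_chapter_page_map(all_images):
--     """构建章节到页码的映射"""
--     # Different decomposition: one pass collecting the distinct truthy chapter
--     # ids in first-occurrence order, then each group built by its own
--     # comprehension over the precomputed (page, chapter_id) pairs.
--     pairs = [(i + 1, img.get("chapter_id")) for i, img in enumerate(all_images)]
--     keys = []
--     for _, ch in pairs:
--         if ch and ch not in keys:
--             keys.append(ch)
--     return {k: [i for i, ch in pairs if ch == k] for k in keys}
-- ===== Notes on version B (the rewrite author's own statement) =====
-- stated objective: alternative
-- what changed: Replaces the incremental dict-building loop (membership test, key initialisation, in-place append per element) with a two-phase group-by: precompute (page, chapter_id) pairs, collect distinct truthy keys in first-occurrence order, then build each group's page list by an independent comprehension over the pairs.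
import Mathlib
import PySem

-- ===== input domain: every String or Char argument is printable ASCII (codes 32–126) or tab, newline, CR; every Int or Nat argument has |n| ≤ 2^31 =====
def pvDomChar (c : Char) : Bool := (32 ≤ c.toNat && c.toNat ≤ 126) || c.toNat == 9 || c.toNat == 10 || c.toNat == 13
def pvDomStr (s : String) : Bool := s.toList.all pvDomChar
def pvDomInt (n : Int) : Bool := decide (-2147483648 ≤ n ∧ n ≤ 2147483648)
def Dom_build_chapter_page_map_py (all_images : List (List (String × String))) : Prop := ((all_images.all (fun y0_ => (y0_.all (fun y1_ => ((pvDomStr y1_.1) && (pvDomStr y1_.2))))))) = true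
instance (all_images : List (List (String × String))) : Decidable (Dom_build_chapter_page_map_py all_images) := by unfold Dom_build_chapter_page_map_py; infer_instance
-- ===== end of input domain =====

-- B replaces A's incremental dict-building loop by a two-phase group-by
-- (distinct truthy keys in first-occurrence order, then one scan per key);
-- alternative decomposition, same return value.


-- ===== PORT A =====
def build_chapter_page_map_py (all_images : List (List (String × String))) : List (String × List Int) :=
  ((PySem.List.enumerate all_images).foldl
    (fun (d : PySem.Dict String (List Int)) (p : Int × List (String × String)) =>
      match (PySem.Dict.mk p.2).get? "chapter_id" with
      | none => d
      | some ch =>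
        if ch = "" then d
        else
          let d' := if d.contains ch then d else d.insert ch []
          d'.modify ch [] (fun xs => xs ++ [p.1 + 1]))
    PySem.Dict.empty).items

-- ===== PORT B =====
def build_chapter_page_map_py_alt (all_images : List (List (String × String))) : List (String × List Int) :=
  let pairs := (PySem.List.enumerate all_images).map
    (fun p => (p.1 + 1, (PySem.Dict.mk p.2).get? "chapter_id"))
  let keys := pairs.foldl
    (fun (ks : List String) q =>
      match q.2 with
      | none => ks
      | some ch => if ch = "" then ks else if ch ∈ ks then ks else ks ++ [ch]) []
  keys.map (fun k => (k, (pairs.filter (fun q => q.2 == some k)).map (fun q => q.1)))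

-- ===== PRECONDITION & SPEC =====
def Spec_build_chapter_page_map_py (all_images : List (List (String × String))) (out : List (String × List Int)) : Prop := out = build_chapter_page_map_py_alt all_images
instance (all_images : List (List (String × String))) (out : List (String × List Int)) : Decidable (Spec_build_chapter_page_map_py all_images out) := by unfold Spec_build_chapter_page_map_py; infer_instance

-- ===== CLAIM (what is proved, stated in full; the proofs are below) =====
def Claim_equal_build_chapter_page_map_py : Prop := ∀ (all_images : List (List (String × String))), Dom_build_chapter_page_map_py all_images → Spec_build_chapter_page_map_py all_images (build_chapter_page_map_py all_images)

-- ===== LEMMAS AND PROOFS =====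

/-- The truthy (page, chapter) pairs: `(i, some ch)` with `ch ≠ ""` becomes `(ch, i)`. -/
def pvT (q : Int × Option String) : Option (String × Int) :=
  match q.2 with
  | none => none
  | some ch => if ch = "" then none else some (ch, q.1)

theorem pvT_none {q : Int × Option String} (h : q.2 = none) : pvT q = none := by
  simp [pvT, h]

theorem pvT_falsy {q : Int × Option String} {ch : String} (h : q.2 = some ch) (hch : ch = "") :
    pvT q = none := by simp [pvT, h, hch]

theorem pvT_some {q : Int × Option String} {ch : String} (h : q.2 = some ch) (hch : ¬ ch = "") :
    pvT q = some (ch, q.1) := by simp [pvT, h, hch]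

/-- A's "init-if-absent then append" is a plain `modify`. -/
theorem pv_absorb (d : PySem.Dict String (List Int)) (k : String) (f : List Int → List Int) :
    ((if d.contains k then d else d.insert k []) : PySem.Dict String (List Int)).modify k [] f
      = d.modify k [] f := by
  by_cases h : d.contains k = true
  · simp [h]
  · have h' : d.contains k = false := by simpa using h
    rw [if_neg (by simp [h'])]
    simp only [PySem.Dict.modify]
    rw [PySem.Dict.getD_insert_self, PySem.Dict.insert_insert_self,
        PySem.Dict.getD_of_not_contains d ([] : List Int) h']

/-- A's loop over the (page, maybe-chapter) pairs is the modify-fold over the truthy pairs. -/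
theorem pv_foldA (ps : List (Int × Option String)) (d : PySem.Dict String (List Int)) :
    ps.foldl
      (fun (d : PySem.Dict String (List Int)) q =>
        match q.2 with
        | none => d
        | some ch =>
          if ch = "" then d
          else
            let d' := if d.contains ch then d else d.insert ch []
            d'.modify ch [] (fun xs => xs ++ [q.1])) d
    = (ps.filterMap pvT).foldl (fun d r => d.modify r.1 [] (fun xs => xs ++ [r.2])) d := by
  induction ps generalizing d with
  | nil => rfl
  | cons q rest ih =>
    rw [List.foldl_cons]
    cases hq : q.2 with
    | none =>
      rw [List.filterMap_cons_none (pvT_none hq)]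
      simp only []
      exact ih d
    | some ch =>
      by_cases hch : ch = ""
      · rw [List.filterMap_cons_none (pvT_falsy hq hch)]
        simp only [hq, hch, if_pos rfl]
        exact ih d
      · rw [List.filterMap_cons_some (pvT_some hq hch), List.foldl_cons]
        simp only [if_neg hch]
        rw [pv_absorb]
        exact ih _

/-- B's key-collecting loop computes the distinct truthy chapter ids in order. -/
theorem pv_keysB (ps : List (Int × Option String)) (ks : List String) :
    ps.foldl
      (fun (ks : List String) q =>
        match q.2 with
        | none => ks
        | some ch => if ch = "" then ks else if ch ∈ ks then ks else ks ++ [ch]) ks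
    = PySem.Set.update ks ((ps.filterMap pvT).map (fun r => r.1)) := by
  induction ps generalizing ks with
  | nil => rfl
  | cons q rest ih =>
    rw [List.foldl_cons]
    cases hq : q.2 with
    | none =>
      rw [List.filterMap_cons_none (pvT_none hq)]
      simp only []
      exact ih ks
    | some ch =>
      by_cases hch : ch = ""
      · rw [List.filterMap_cons_none (pvT_falsy hq hch)]
        simp only [hch]
        exact ih ks
      · rw [List.filterMap_cons_some (pvT_some hq hch), List.map_cons,
            PySem.Set.update_cons, PySem.Set.add_eq_ite]
        simp only [if_neg hch]
        exact ih _

/-- For a truthy key, B's per-key scan equals the group from the truthy pairs. -/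
theorem pv_vals (ps : List (Int × Option String)) (k : String) (hk : k ≠ "") :
    (ps.filter (fun q => q.2 == some k)).map (fun q => q.1)
      = ((ps.filterMap pvT).filter (fun r => r.1 == k)).map (fun r => r.2) := by
  induction ps with
  | nil => rfl
  | cons q rest ih =>
    cases hq : q.2 with
    | none =>
      rw [List.filterMap_cons_none (pvT_none hq), List.filter_cons]
      simp only [hq]
      simpa using ih
    | some ch =>
      by_cases hch : ch = ""
      · rw [List.filterMap_cons_none (pvT_falsy hq hch), List.filter_cons]
        subst hch
        simp only [hq]
        simpa [Ne.symm hk] using ih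
      · rw [List.filterMap_cons_some (pvT_some hq hch), List.filter_cons, List.filter_cons]
        by_cases hck : ch = k
        · subst hck
          simp only [hq]
          simpa using ih
        · simp only [hq]
          simpa [hck] using ih

theorem pv_keys_ne_empty (ps : List (Int × Option String)) (k : String)
    (h : k ∈ (ps.filterMap pvT).map (fun r => r.1)) : k ≠ "" := by
  intro hk0
  rcases List.mem_map.1 h with ⟨r, hr, hk⟩
  rcases List.mem_filterMap.1 hr with ⟨q, -, hq⟩
  cases hq2 : q.2 with
  | none => rw [pvT_none hq2] at hq; simp at hq
  | some ch =>
    by_cases hch : ch = ""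
    · rw [pvT_falsy hq2 hch] at hq; simp at hq
    · rw [pvT_some hq2 hch] at hq
      injection hq with hq
      rw [← hq] at hk
      exact hch (hk.trans hk0)

-- ===== VERDICT (by name: the statement is the Claim_ definition above) =====
theorem build_chapter_page_map_py_spec : Claim_equal_build_chapter_page_map_py := by
  intro all_images _
  unfold Spec_build_chapter_page_map_py
  have hA : build_chapter_page_map_py all_images =
      (((PySem.List.enumerate all_images).map
          (fun p => (p.1 + 1, (PySem.Dict.mk p.2).get? "chapter_id"))).foldl
        (fun (d : PySem.Dict String (List Int)) q =>
          match q.2 with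
          | none => d
          | some ch =>
            if ch = "" then d
            else
              let d' := if d.contains ch then d else d.insert ch []
              d'.modify ch [] (fun xs => xs ++ [q.1])) PySem.Dict.empty).items := by
    unfold build_chapter_page_map_py
    rw [List.foldl_map]
  set ps := (PySem.List.enumerate all_images).map
      (fun p => (p.1 + 1, (PySem.Dict.mk p.2).get? "chapter_id")) with hpsdef
  have hB : build_chapter_page_map_py_alt all_images =
      (ps.foldl
        (fun (ks : List String) q =>
          match q.2 with
          | none => ks
          | some ch => if ch = "" then ks else if ch ∈ ks then ks else ks ++ [ch]) []).map
        (fun k => (k, (ps.filter (fun q => q.2 == some k)).map (fun q => q.1))) := rfl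
  rw [hA, hB, pv_foldA, pv_keysB]
  set tps := ps.filterMap pvT with htps
  have hnd : ((tps.foldl (fun d r => d.modify r.1 [] (fun xs => xs ++ [r.2]))
      PySem.Dict.empty : PySem.Dict String (List Int))).keys.Nodup :=
    PySem.Dict.nodup_keys_foldl_modify_key tps (fun r => r.1) []
      (fun _ r => fun xs => xs ++ [r.2]) PySem.Dict.empty (by simp)
  have hkeys : ((tps.foldl (fun d r => d.modify r.1 [] (fun xs => xs ++ [r.2]))
      PySem.Dict.empty : PySem.Dict String (List Int))).keys
      = PySem.Set.update [] (tps.map (fun r => r.1)) := by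
    rw [PySem.Dict.keys_foldl_modify_key tps (fun r => r.1) []
      (fun _ r => fun xs => xs ++ [r.2]) PySem.Dict.empty]
    simp
  rw [PySem.Dict.items_eq_map_keys _ hnd ([] : List Int), hkeys, PySem.Set.update_nil_left]
  apply List.map_congr_left
  intro k hk
  have hk' : k ∈ tps.map (fun r => r.1) := by
    simpa using (PySem.Set.mem_ofList _ _).1 hk
  have hkne : k ≠ "" := pv_keys_ne_empty ps k hk'
  rw [pv_vals ps k hkne]
  congr 1
  rw [PySem.Dict.getD_foldl_modify_append]
  simp [htps]
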